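-- pv_equiv track=rewrite | github.com/aria-ml/dataeval | src/dataeval/utils/_internal.py | _get_key_indices
-- ===== SOURCE A (Python) =====
-- from collections.abc import Callable, Iterable, Iterator, Mapping, Sequence
--
-- def _get_key_indices(keys: Iterable[tuple[str, ...]]) -> dict[tuple[str, ...], int]:
--     """
--     Find indices to minimize unique tuple keys.
--
--     Parameters
--     ----------
--     keys : Iterable[tuple[str, ...]]
--         Collection of unique expanded tuple keys
--
--     Returns
--     -------
--     dict[tuple[str, ...], int]
--         Mapping of tuple keys to starting index
--     """
--     indices = dict.fromkeys(keys, -1)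
--     ks = list(keys)
--     while len(ks) > 0:
--         seen: dict[tuple[str, ...], list[tuple[str, ...]]] = {}
--         for k in ks:
--             seen.setdefault(k[indices[k] :], []).append(k)
--         ks.clear()
--         for sk in seen.values():
--             if len(sk) > 1:
--                 ks.extend(sk)
--                 for k in sk:
--                     indices[k] -= 1
--     return indices
-- ===== SOURCE B (Python) =====
-- def _get_key_indices(keys):
--     """B: per-key closed form — index = -1 - (max common-suffix length with any other key)."""
--     ks = list(keys)
--     out = {}
--     for i, k in enumerate(ks):
--         best = 0
--         for j, o in enumerate(ks):
--             if j != i: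
--                 best = max(best, _lcp(list(reversed(k)), list(reversed(o))))
--         out[k] = -1 - best
--     return out
--
-- def _lcp(a, b):
--     if a and b and a[0] == b[0]:
--         return 1 + _lcp(a[1:], b[1:])
--     return 0
-- ===== Notes on version B (the rewrite author's own statement) =====
-- stated objective: alternative
-- what changed: A iteratively re-groups still-colliding keys by ever-longer suffixes in rounds of dict building; B computes each key's index directly as -1 minus the maximum common-suffix length with any other key, with no refinement loop or grouping dicts.
-- outside the precondition, e.g. on _get_key_indices([('a',), ('a',)]): A does not finish within the time limit, B returns {('a',): -2}
import Mathlib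
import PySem

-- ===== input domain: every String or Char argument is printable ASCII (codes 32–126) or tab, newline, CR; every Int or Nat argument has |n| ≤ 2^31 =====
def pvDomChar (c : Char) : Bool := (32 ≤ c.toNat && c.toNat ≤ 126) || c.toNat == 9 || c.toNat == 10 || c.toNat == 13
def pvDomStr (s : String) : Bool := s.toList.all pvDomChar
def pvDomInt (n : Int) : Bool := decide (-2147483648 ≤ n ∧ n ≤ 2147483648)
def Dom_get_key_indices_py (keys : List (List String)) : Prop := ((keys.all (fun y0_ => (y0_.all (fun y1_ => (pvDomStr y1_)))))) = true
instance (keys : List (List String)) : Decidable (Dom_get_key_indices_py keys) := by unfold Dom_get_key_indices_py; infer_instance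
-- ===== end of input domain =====

-- B replaces A's iterative group-refinement (repeated re-grouping of still-colliding keys by growing suffixes)
-- with a per-key closed form: index(k) = -1 - max common-suffix length with any other key (objective: alternative).

-- ===== PORT A =====
-- k[indices[k]:]  (indices[k] is always present on the inputs reached; getD's default is never used)
def pvSuffix (ind : PySem.Dict (List String) Int) (k : List String) : List String :=
  PySem.List.slice k (some (ind.getD k 0))

-- seen.setdefault(k[indices[k]:], []).append(k) — in-place append to the stored list, ported as Dict.modify
def pvSeen (ind : PySem.Dict (List String) Int) (ks : List (List String)) :
    PySem.Dict (List String) (List (List String)) :=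
  ks.foldl (fun d k => d.modify (pvSuffix ind k) [] (fun l => l ++ [k])) PySem.Dict.empty

-- one execution of the while-loop body: returns (indices, ks) after the body
def pvRound (ind : PySem.Dict (List String) Int) (ks : List (List String)) :
    PySem.Dict (List String) Int × List (List String) :=
  (pvSeen ind ks).values.foldl
    (fun st sk =>
      if 1 < sk.length then
        (sk.foldl (fun d k => d.modify k 0 (fun v => v - 1)) st.1, st.2 ++ sk)
      else st)
    (ind, ([] : List (List String)))

-- the while loop; the fuel only makes it total (proved sufficient on Pre_: ≤ maxlen+1 iterations run)
def pvLoop : Nat → PySem.Dict (List String) Int → List (List String) → PySem.Dict (List String) Int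
  | 0, ind, _ => ind
  | fuel + 1, ind, ks =>
      if 0 < ks.length then
        let st := pvRound ind ks
        pvLoop fuel st.1 st.2
      else ind

def get_key_indices_py (keys : List (List String)) : List (List String × Int) :=
  let ind0 := keys.foldl (fun d k => d.insert k (-1 : Int)) PySem.Dict.empty  -- dict.fromkeys(keys, -1)
  (pvLoop ((keys.map List.length).foldl (fun m n => max m n) 0 + 2) ind0 keys).items

-- ===== PORT B =====
def pvLcp : List String → List String → Nat
  | x :: xs, y :: ys => if x = y then pvLcp xs ys + 1 else 0
  | _, _ => 0

-- best = max over j ≠ i of the common-suffix length of ks[j] and k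
def pvBest (ks : List (List String)) (i : Int) (k : List String) : Nat :=
  (PySem.List.enumerate ks).foldl
    (fun best p => if p.1 ≠ i then max best (pvLcp k.reverse p.2.reverse) else best) 0

def get_key_indices_py_alt (keys : List (List String)) : List (List String × Int) :=
  ((PySem.List.enumerate keys).foldl
    (fun d p => d.insert p.2 (-1 - (pvBest keys p.1 p.2 : Int))) PySem.Dict.empty).items

-- ===== PRECONDITION & SPEC =====
-- Pre_ excludes lists with duplicate keys: there A's while loop never terminates (a duplicated key's
-- group always keeps ≥ 2 members), so A returns on exactly the duplicate-free inputs.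
def Pre_get_key_indices_py (keys : List (List String)) : Prop := keys.Nodup
instance (keys : List (List String)) : Decidable (Pre_get_key_indices_py keys) := by
  unfold Pre_get_key_indices_py; infer_instance

def pvWitness_get_key_indices_py : List (List String) := [["a"], ["b", "a"], ["c"]]

def Spec_get_key_indices_py (keys : List (List String)) (out : List (List String × Int)) : Prop :=
  out = get_key_indices_py_alt keys
instance (keys : List (List String)) (out : List (List String × Int)) :
    Decidable (Spec_get_key_indices_py keys out) := by unfold Spec_get_key_indices_py; infer_instance

-- ===== CLAIM (what is proved, stated in full; the proofs are below) =====
def Claim_equal_get_key_indices_py : Prop :=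
  ∀ (keys : List (List String)), Dom_get_key_indices_py keys → Pre_get_key_indices_py keys →
    Spec_get_key_indices_py keys (get_key_indices_py keys)

-- ===== LEMMAS AND PROOFS =====

-- the per-key quantity both programs compute: max common-suffix length with any OTHER key
def pvM (keys : List (List String)) (k : List String) : Nat :=
  (keys.filter (fun o => decide (o ≠ k))).foldl (fun m o => max m (pvLcp k.reverse o.reverse)) 0

def pvMaxLen (keys : List (List String)) : Nat := (keys.map List.length).foldl (fun m n => max m n) 0

theorem pvLcp_comm (a b : List String) : pvLcp a b = pvLcp b a := by
  induction a generalizing b with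
  | nil => cases b <;> rfl
  | cons x xs ih =>
    cases b with
    | nil => rfl
    | cons y ys =>
      simp only [pvLcp]
      by_cases h : x = y
      · subst h; simp [ih]
      · simp [h, Ne.symm h]

theorem pvLcp_le_length (a b : List String) : pvLcp a b ≤ a.length := by
  induction a generalizing b with
  | nil => cases b <;> simp [pvLcp]
  | cons x xs ih =>
    cases b with
    | nil => simp [pvLcp]
    | cons y ys =>
      simp only [pvLcp]
      split_ifs <;> simp only [List.length_cons] <;> [exact Nat.succ_le_succ (ih ys); omega]

theorem take_eq_iff_le_lcp (a b : List String) (m : Nat) (hne : a ≠ b) :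
    a.take m = b.take m ↔ m ≤ pvLcp a b := by
  induction a generalizing b m with
  | nil =>
    cases b with
    | nil => exact absurd rfl hne
    | cons y ys =>
      cases m with
      | zero => simp [pvLcp]
      | succ m => simp [pvLcp]
  | cons x xs ih =>
    cases b with
    | nil =>
      cases m with
      | zero => simp [pvLcp]
      | succ m => simp [pvLcp]
    | cons y ys =>
      cases m with
      | zero => simp
      | succ m =>
        simp only [List.take_succ_cons, List.cons.injEq, pvLcp]
        by_cases hxy : x = y
        · subst hxy
          have hxs : xs ≠ ys := fun h => hne (by rw [h])
          simp [ih ys m hxs]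
        · simp [hxy]

theorem slice_neg (k : List String) (r : Nat) (h : 1 ≤ r) :
    PySem.List.slice k (some (-(r : Int))) = k.drop (k.length - r) := by
  simp only [PySem.List.slice, PySem.List.clampIdx]
  split_ifs with h1 h2
  · have : k.length ≤ r := by omega
    simp [Nat.sub_eq_zero_of_le this]
  · have : ((k.length : Int) + -(r : Int)).toNat = k.length - r := by omega
    rw [this, List.take_of_length_le] ; simp
  · omega

theorem drop_suffix_eq_iff (k k' : List String) (r : Nat) (hne : k ≠ k') :
    k.drop (k.length - r) = k'.drop (k'.length - r) ↔ r ≤ pvLcp k.reverse k'.reverse := by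
  have h1 : k.drop (k.length - r) = (k.reverse.take r).reverse := by
    rw [List.take_reverse] ; simp
  have h2 : k'.drop (k'.length - r) = (k'.reverse.take r).reverse := by
    rw [List.take_reverse] ; simp
  rw [h1, h2]
  constructor
  · intro h
    exact (take_eq_iff_le_lcp _ _ r (fun hh => hne (List.reverse_injective hh))).1
      (List.reverse_injective h)
  · intro h
    rw [(take_eq_iff_le_lcp _ _ r (fun hh => hne (List.reverse_injective hh))).2 h]

-- pvM bounds and attainment
theorem le_pvM (keys : List (List String)) (k k' : List String) (h : k' ∈ keys) (hne : k' ≠ k) :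
    pvLcp k.reverse k'.reverse ≤ pvM keys k := by
  have hmem : k' ∈ keys.filter (fun o => decide (o ≠ k)) := by
    rw [List.mem_filter]; exact ⟨h, by simp [hne]⟩
  exact (PySem.List.le_foldl_max_nat _ (fun o => pvLcp k.reverse o.reverse) 0).2 k' hmem

theorem pvM_attained (keys : List (List String)) (k : List String) (h : 0 < pvM keys k) :
    ∃ k' ∈ keys, k' ≠ k ∧ pvM keys k ≤ pvLcp k.reverse k'.reverse := by
  have : pvM keys k
      = ((keys.filter (fun o => decide (o ≠ k))).map (fun o => pvLcp k.reverse o.reverse)).foldl max 0 := by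
    rw [List.foldl_map]; rfl
  rcases PySem.List.foldl_max_mem ((keys.filter (fun o => decide (o ≠ k))).map
      (fun o => pvLcp k.reverse o.reverse)) 0 with hc | hc
  · rw [this, hc] at h; omega
  · rw [this]
    rcases List.mem_map.1 hc with ⟨k', hk', he⟩
    rw [List.mem_filter] at hk'
    exact ⟨k', hk'.1, by simpa using hk'.2, by rw [he]⟩

theorem pvM_le_maxLen (keys : List (List String)) (k : List String) (h : k ∈ keys) :
    pvM keys k ≤ pvMaxLen keys := by
  by_cases hz : 0 < pvM keys k
  · rcases pvM_attained keys k hz with ⟨k', _, _, hle⟩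
    calc pvM keys k ≤ pvLcp k.reverse k'.reverse := hle
      _ ≤ k.reverse.length := pvLcp_le_length _ _
      _ = k.length := by simp
      _ ≤ pvMaxLen keys := by
          simpa [pvMaxLen, List.foldl_map] using
            (PySem.List.le_foldl_max_nat (keys.map List.length) (fun n => n) 0).2 k.length
            (List.mem_map.2 ⟨k, h, rfl⟩)
  · omega

-- enumerate facts
theorem mem_enum_facts (xs : List (List String)) (s i : Int) (k : List String)
    (h : (i, k) ∈ PySem.List.enumerate xs s) : s ≤ i ∧ k ∈ xs := by
  induction xs generalizing s with
  | nil => simp [PySem.List.enumerate] at h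
  | cons x t ih =>
    rw [show PySem.List.enumerate (x :: t) s = (s, x) :: PySem.List.enumerate t (s + 1) from rfl] at h
    rcases List.mem_cons.1 h with h | h
    · cases h; exact ⟨le_refl _, List.mem_cons_self⟩
    · obtain ⟨h1, h2⟩ := ih (s+1) h
      exact ⟨by omega, List.mem_cons_of_mem _ h2⟩

theorem enum_filter_ne (keys : List (List String)) (s i : Int) (k : List String)
    (hnd : keys.Nodup) (hmem : (i, k) ∈ PySem.List.enumerate keys s) :
    ((PySem.List.enumerate keys s).filter (fun p => decide (p.1 ≠ i))).map (·.2)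
      = keys.filter (fun o => decide (o ≠ k)) := by
  induction keys generalizing s with
  | nil => simp [PySem.List.enumerate] at hmem
  | cons x t ih =>
    rw [show PySem.List.enumerate (x :: t) s = (s, x) :: PySem.List.enumerate t (s + 1) from rfl] at hmem ⊢
    rcases List.mem_cons.1 hmem with h | h
    · simp only [Prod.mk.injEq] at h
      obtain ⟨rfl, rfl⟩ := h
      have hx : ∀ p ∈ PySem.List.enumerate t (i+1), p.1 ≠ i := by
        intro p hp
        have := mem_enum_facts t (i+1) p.1 p.2 hp
        omega
      have hnotin : k ∉ t := (List.nodup_cons.1 hnd).1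
      rw [List.filter_cons, List.filter_cons]
      simp only [ne_eq, not_true_eq_false, decide_false]
      rw [List.filter_eq_self.2 (by intro p hp; simpa using hx p hp)]
      rw [List.filter_eq_self.2 (by intro o ho; simp; intro hh; subst hh; exact hnotin ho)]
      exact PySem.List.map_snd_enumerate t (i+1)
    · have hk : k ∈ t := (mem_enum_facts t (s+1) i k h).2
      have hne1 : (s ≠ i) := by have := (mem_enum_facts t (s+1) i k h).1; omega
      have hne2 : (x ≠ k) := by
        intro hh; subst hh; exact (List.nodup_cons.1 hnd).1 hk
      rw [List.filter_cons, List.filter_cons]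
      have e1 : (decide ¬(s, x).1 = i) = true := by simp; omega
      have e2 : (decide ¬x = k) = true := by simp [hne2]
      rw [e1, e2]
      simp only [if_true, List.map_cons]
      rw [ih (s+1) (List.nodup_cons.1 hnd).2 h]

-- pointwise-decrement fold on the indices dict
theorem items_decfold (keys : List (List String)) (v : List String → Int)
    (L : List (List String)) (d : PySem.Dict (List String) Int)
    (hd : d.items = keys.map (fun k => (k, v k)))
    (hkeys : keys.Nodup) (hL : L.Nodup) (hsub : ∀ k ∈ L, k ∈ keys) :
    (L.foldl (fun d k => d.modify k 0 (fun v => v - 1)) d).items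
      = keys.map (fun k => (k, v k - if k ∈ L then 1 else 0)) := by
  induction L generalizing d v with
  | nil => simp [hd]
  | cons k0 rest ih =>
    have hk0 : k0 ∈ keys := hsub k0 List.mem_cons_self
    have hdk : d.keys = keys := by
      show d.items.map (fun p => p.1) = keys
      rw [hd, List.map_map]
      have : ((fun p : List String × Int => p.1) ∘ fun k => (k, v k)) = id := rfl
      rw [this, List.map_id]
    have hdnd : d.keys.Nodup := by rw [hdk]; exact hkeys
    have hget : d.getD k0 0 = v k0 :=
      PySem.Dict.getD_of_mem_items d (by rw [hd]; exact List.mem_map.2 ⟨k0, hk0, rfl⟩) hdnd 0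
    have hcont : d.contains k0 = true := by
      rw [PySem.Dict.contains_iff_mem_keys, hdk]; exact hk0
    simp only [List.foldl_cons]
    have hstep : (d.modify k0 0 (fun v => v - 1)).items
        = keys.map (fun k => (k, if k = k0 then v k - 1 else v k)) := by
      show (d.insert k0 (d.getD k0 0 - 1)).items = _
      rw [PySem.Dict.items_insert_of_contains d _ hcont, hget, hd, List.map_map]
      refine List.map_congr_left (fun k _ => ?_)
      by_cases hk : k = k0
      · subst hk; simp
      · simp [hk]
    rw [ih (fun k => if k = k0 then v k - 1 else v k) _ hstep
      (List.nodup_cons.1 hL).2 (fun k hk => hsub k (List.mem_cons_of_mem _ hk))]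
    refine List.map_congr_left (fun k _ => ?_)
    by_cases hk : k = k0
    · subst hk
      have : k ∉ rest := (List.nodup_cons.1 hL).1
      simp [this]
    · by_cases hr : k ∈ rest <;> simp [hk, hr]

theorem lt_length_of_two {a : Type} (l : List a) (k k' : a) (h1 : k ∈ l) (h2 : k' ∈ l)
    (hne : k ≠ k') : 1 < l.length := by
  match l with
  | [] => simp at h1
  | [x] =>
    simp at h1 h2
    exact absurd (h1.trans h2.symm) hne
  | x :: y :: t => simp

theorem exists_other {a : Type} (l : List a) (k : a) (hnd : l.Nodup) (hk : k ∈ l)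
    (hlen : 1 < l.length) : ∃ k' ∈ l, k' ≠ k := by
  match l with
  | [] => simp at hk
  | [x] => simp at hlen
  | x :: y :: t =>
    by_cases h : x = k
    · subst h
      refine ⟨y, by simp, ?_⟩
      intro hh; subst hh
      exact (List.nodup_cons.1 hnd).1 List.mem_cons_self
    · exact ⟨x, List.mem_cons_self, h⟩

-- round invariant step
theorem round_step (keys : List (List String)) (hkeys : keys.Nodup) (r : Nat)
    (ind : PySem.Dict (List String) Int) (ks : List (List String))
    (hitems : ind.items = keys.map (fun k => (k, -(1 + (min (pvM keys k) r : Int)))))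
    (hnd : ks.Nodup) (hks : ∀ k, k ∈ ks ↔ (k ∈ keys ∧ r ≤ pvM keys k)) :
    (pvRound ind ks).1.items
        = keys.map (fun k => (k, -(1 + (min (pvM keys k) (r+1) : Int)))) ∧
      (pvRound ind ks).2.Nodup ∧
      (∀ k, k ∈ (pvRound ind ks).2 ↔ (k ∈ keys ∧ r + 1 ≤ pvM keys k)) := by
  set dsfx : List String → List String := fun k => k.drop (k.length - (r+1)) with hdsfx
  have hsubks : ∀ k ∈ ks, k ∈ keys := fun k hk => ((hks k).1 hk).1
  have hindk : ind.keys = keys := by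
    show ind.items.map (fun p => p.1) = keys
    rw [hitems, List.map_map]
    have : ((fun p : List String × Int => p.1) ∘ fun k => (k, -(1 + (min (pvM keys k) r : Int)))) = id := rfl
    rw [this, List.map_id]
  have hindnd : ind.keys.Nodup := by rw [hindk]; exact hkeys
  have h_sfx : ∀ k ∈ ks, pvSuffix ind k = dsfx k := by
    intro k hk
    have hkk : k ∈ keys := hsubks k hk
    have hget : ind.getD k 0 = -(1 + (min (pvM keys k) r : Int)) :=
      PySem.Dict.getD_of_mem_items ind (by rw [hitems]; exact List.mem_map.2 ⟨k, hkk, rfl⟩) hindnd 0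
    have hmin : min (pvM keys k) r = r := by
      have := ((hks k).1 hk).2; omega
    have hval : ind.getD k 0 = -(((r+1 : Nat) : Int)) := by
      rw [hget]; push_cast; omega
    unfold pvSuffix
    rw [hval, slice_neg k (r+1) (by omega)]
  have hseen : pvSeen ind ks
      = (ks.map (fun k => (dsfx k, k))).foldl
          (fun d p => d.modify p.1 [] (fun l => l ++ [p.2])) PySem.Dict.empty := by
    unfold pvSeen
    rw [List.foldl_map]
    apply PySem.List.foldl_congr_mem
    intro acc k hk
    rw [h_sfx k hk]
  set D := (ks.map (fun k => (dsfx k, k))).foldl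
      (fun d p => d.modify p.1 [] (fun l => l ++ [p.2])) PySem.Dict.empty with hD
  set grp : List String → List (List String) := fun s => ks.filter (fun k => dsfx k == s) with hgrp
  have hgetD : ∀ s, D.getD s [] = grp s := by
    intro s
    rw [hD, PySem.Dict.getD_foldl_modify_append]
    rw [List.filter_map, List.map_map]
    simp only [PySem.Dict.getD_empty, List.nil_append, hgrp]
    have h1 : ((fun x : List String × List String => x.2) ∘ fun k => (dsfx k, k)) = id := rfl
    have h2 : ((fun p : List String × List String => p.1 == s) ∘ fun k => (dsfx k, k))
        = fun k => dsfx k == s := rfl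
    rw [h1, h2, List.map_id]
  have hkeysD : D.keys = PySem.Set.ofList (ks.map dsfx) := by
    rw [hD]
    have h := PySem.Dict.keys_foldl_modify_key (ks.map (fun k => (dsfx k, k)))
      (fun p : List String × List String => p.1) ([] : List (List String))
      (fun _ p => fun l => l ++ [p.2]) PySem.Dict.empty
    simpa [List.map_map] using h
  have hndD : D.keys.Nodup := by
    rw [hkeysD]; exact PySem.Set.nodup_ofList _
  have hvals : D.values = (PySem.Set.ofList (ks.map dsfx)).map grp := by
    rw [PySem.Dict.values_eq_map_keys D hndD ([]), hkeysD]
    exact List.map_congr_left (fun s _ => hgetD s)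
  set bigs := D.values.filter (fun sk => decide (1 < sk.length)) with hbigs
  have hround : pvRound ind ks
      = ((bigs.flatten).foldl (fun d k => d.modify k 0 (fun v => v - 1)) ind, bigs.flatten) := by
    unfold pvRound
    rw [hseen]
    rw [PySem.List.foldl_ite_eq_foldl_filter (p := fun sk : List (List String) => 1 < sk.length)
      (f := fun (st : PySem.Dict (List String) Int × List (List String)) sk =>
        (sk.foldl (fun d k => d.modify k 0 (fun v => v - 1)) st.1, st.2 ++ sk))]
    rw [PySem.List.foldl_prod_mk
      (f := fun (d : PySem.Dict (List String) Int) (sk : List (List String)) =>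
        List.foldl (fun d k => d.modify k 0 (fun v => v - 1)) d sk)
      (g := fun (l : List (List String)) (sk : List (List String)) => l ++ sk)]
    rw [PySem.List.foldl_append_eq_flatten, List.nil_append, ← List.foldl_flatten]
  have hmem_grp : ∀ s k, k ∈ grp s ↔ (k ∈ ks ∧ dsfx k = s) := by
    intro s k; rw [hgrp]; simp [List.mem_filter]
  have hmem_bigs : ∀ sk, sk ∈ bigs ↔ ((∃ s ∈ ks.map dsfx, sk = grp s) ∧ 1 < sk.length) := by
    intro sk
    rw [hbigs, List.mem_filter, hvals]
    constructor
    · rintro ⟨h1, h2⟩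
      rcases List.mem_map.1 h1 with ⟨s, hs, rfl⟩
      exact ⟨⟨s, (PySem.Set.mem_ofList _ _).1 hs, rfl⟩, by simpa using h2⟩
    · rintro ⟨⟨s, hs, rfl⟩, h2⟩
      exact ⟨List.mem_map.2 ⟨s, (PySem.Set.mem_ofList _ _).2 hs, rfl⟩, by simpa using h2⟩
  have hcollide : ∀ k k', k ∈ ks → k' ∈ ks → k' ≠ k → (dsfx k' = dsfx k ↔ r + 1 ≤ pvLcp k.reverse k'.reverse) := by
    intro k k' _ _ hne
    rw [hdsfx]
    simp only
    rw [show (k'.drop (k'.length - (r+1)) = k.drop (k.length - (r+1)))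
        ↔ (k.drop (k.length - (r+1)) = k'.drop (k'.length - (r+1))) from ⟨Eq.symm, Eq.symm⟩]
    exact drop_suffix_eq_iff k k' (r+1) (fun h => hne h.symm)
  have m1 : ∀ k, k ∈ bigs.flatten ↔ (k ∈ keys ∧ r + 1 ≤ pvM keys k) := by
    intro k
    rw [List.mem_flatten]
    constructor
    · rintro ⟨sk, hsk, hk⟩
      rcases (hmem_bigs sk).1 hsk with ⟨⟨s, _, rfl⟩, hlen⟩
      obtain ⟨hkks, hks_s⟩ := (hmem_grp s k).1 hk
      have hgnd : (grp s).Nodup := by rw [hgrp]; exact hnd.filter _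
      obtain ⟨k', hk', hne⟩ := exists_other (grp s) k hgnd hk hlen
      obtain ⟨hk'ks, hk's⟩ := (hmem_grp s k').1 hk'
      have hlcp : r + 1 ≤ pvLcp k.reverse k'.reverse :=
        (hcollide k k' hkks hk'ks hne).1 (hk's.trans hks_s.symm)
      exact ⟨hsubks k hkks, le_trans hlcp (le_pvM keys k k' (hsubks k' hk'ks) hne)⟩
    · rintro ⟨hkk, hle⟩
      have hkks : k ∈ ks := (hks k).2 ⟨hkk, by omega⟩
      obtain ⟨k', hk'keys, hne, hlcp⟩ := pvM_attained keys k (by omega)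
      have hk'ks : k' ∈ ks := by
        refine (hks k').2 ⟨hk'keys, ?_⟩
        have h1 : pvLcp k'.reverse k.reverse ≤ pvM keys k' :=
          le_pvM keys k' k hkk (fun h => hne h.symm)
        have h2 : pvLcp k'.reverse k.reverse = pvLcp k.reverse k'.reverse := pvLcp_comm _ _
        omega
      have hsame : dsfx k' = dsfx k :=
        (hcollide k k' hkks hk'ks hne).2 (by omega)
      refine ⟨grp (dsfx k), (hmem_bigs _).2 ⟨⟨dsfx k, List.mem_map.2 ⟨k, hkks, rfl⟩, rfl⟩, ?_⟩,
        (hmem_grp _ k).2 ⟨hkks, rfl⟩⟩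
      exact lt_length_of_two _ k k' ((hmem_grp _ k).2 ⟨hkks, rfl⟩)
        ((hmem_grp _ k').2 ⟨hk'ks, hsame⟩) (fun h => hne h.symm)
  have m2 : bigs.flatten.Nodup := by
    rw [List.nodup_flatten]
    constructor
    · intro sk hsk
      rcases (hmem_bigs sk).1 hsk with ⟨⟨s, _, rfl⟩, _⟩
      rw [hgrp]; exact hnd.filter _
    · have hvnd : D.values.Pairwise List.Disjoint := by
        rw [hvals]
        rw [List.pairwise_map]
        refine List.Pairwise.imp ?_ (PySem.Set.nodup_ofList (ks.map dsfx))
        intro s1 s2 hne k hk1 hk2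
        exact hne (((hmem_grp s1 k).1 hk1).2.symm.trans ((hmem_grp s2 k).1 hk2).2)
      exact hvnd.sublist List.filter_sublist
  rw [hround]
  refine ⟨?_, m2, m1⟩
  rw [items_decfold keys (fun k => -(1 + (min (pvM keys k) r : Int))) bigs.flatten ind hitems
    hkeys m2 (fun k hk => ((m1 k).1 hk).1)]
  refine List.map_congr_left (fun k hkk => ?_)
  simp only [Prod.mk.injEq, true_and]
  by_cases hk : k ∈ bigs.flatten
  · have hle := ((m1 k).1 hk).2
    simp only [hk, if_true]
    omega
  · have : ¬ (r + 1 ≤ pvM keys k) := fun h => hk ((m1 k).2 ⟨hkk, h⟩)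
    simp only [hk, if_false]
    omega

-- loop lemma
theorem loop_final (keys : List (List String)) (hkeys : keys.Nodup) :
    ∀ (fuel r : Nat) (ind : PySem.Dict (List String) Int) (ks : List (List String)),
    ind.items = keys.map (fun k => (k, -(1 + (min (pvM keys k) r : Int)))) →
    ks.Nodup → (∀ k, k ∈ ks ↔ (k ∈ keys ∧ r ≤ pvM keys k)) →
    pvMaxLen keys + 2 - r ≤ fuel →
    (pvLoop fuel ind ks).items = keys.map (fun k => (k, -(1 + (pvM keys k : Int)))) := by
  intro fuel
  induction fuel with
  | zero =>
    intro r ind ks hitems hnd hks hfuel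
    match ks, hks with
    | [], hks =>
      show ind.items = _
      rw [hitems]
      refine List.map_congr_left (fun k hkk => ?_)
      have hnot : ¬ (r ≤ pvM keys k) := by
        intro h
        simpa using (hks k).2 ⟨hkk, h⟩
      simp only [Prod.mk.injEq, true_and]
      omega
    | k :: t, hks =>
      exfalso
      have hkk := (hks k).1 List.mem_cons_self
      have := pvM_le_maxLen keys k hkk.1
      have := hkk.2
      omega
  | succ fuel ih =>
    intro r ind ks hitems hnd hks hfuel
    match ks, hnd, hks with
    | [], hnd, hks =>
      show ind.items = _
      rw [hitems]
      refine List.map_congr_left (fun k hkk => ?_)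
      have hnot : ¬ (r ≤ pvM keys k) := by
        intro h
        simpa using (hks k).2 ⟨hkk, h⟩
      simp only [Prod.mk.injEq, true_and]
      omega
    | k0 :: t, hnd, hks =>
      have hkk := (hks k0).1 List.mem_cons_self
      have hM := pvM_le_maxLen keys k0 hkk.1
      have hr : r ≤ pvMaxLen keys := le_trans hkk.2 hM
      obtain ⟨h1, h2, h3⟩ := round_step keys hkeys r ind (k0 :: t) hitems hnd hks
      show (pvLoop fuel (pvRound ind (k0 :: t)).1 (pvRound ind (k0 :: t)).2).items = _
      exact ih (r+1) _ _ h1 h2 h3 (by omega)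

theorem pvBest_eq (keys : List (List String)) (i : Int) (k : List String)
    (hnd : keys.Nodup) (hmem : (i, k) ∈ PySem.List.enumerate keys 0) :
    pvBest keys i k = pvM keys k := by
  unfold pvBest pvM
  rw [PySem.List.foldl_ite_eq_foldl_filter (p := fun p : Int × List String => p.1 ≠ i)
    (f := fun best p => max best (pvLcp k.reverse p.2.reverse))]
  rw [← enum_filter_ne keys 0 i k hnd hmem, List.foldl_map]

-- B-side closed form
theorem alt_eq (keys : List (List String)) (hkeys : keys.Nodup) :
    get_key_indices_py_alt keys = keys.map (fun k => (k, -(1 + (pvM keys k : Int)))) := by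
  unfold get_key_indices_py_alt
  rw [PySem.Dict.items_foldl_insert_fresh (PySem.List.enumerate keys 0) (fun p => p.2)
    (fun p => -1 - (pvBest keys p.1 p.2 : Int)) PySem.Dict.empty
    (by intro a _; simp)
    (by rw [show (PySem.List.enumerate keys 0).map (fun p => p.2) = keys from
          PySem.List.map_snd_enumerate keys 0]; exact hkeys)]
  rw [show PySem.Dict.empty.items = ([] : List (List String × Int)) from rfl, List.nil_append]
  rw [List.map_congr_left (fun p hp => by
    simp only [Function.comp]
    rw [pvBest_eq keys p.1 p.2 hkeys (by simpa using hp)]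
    congr 1
    ring :
    ∀ p ∈ PySem.List.enumerate keys 0,
      (fun p : Int × List String => (p.2, -1 - (pvBest keys p.1 p.2 : Int))) p
        = ((fun o => (o, -(1 + (pvM keys o : Int)))) ∘ (fun p : Int × List String => p.2)) p)]
  rw [← List.map_map, PySem.List.map_snd_enumerate]

-- ===== VERDICT =====
theorem get_key_indices_py_spec : Claim_equal_get_key_indices_py := by
  intro keys _ hpre
  unfold Spec_get_key_indices_py
  rw [alt_eq keys hpre]
  unfold get_key_indices_py
  have h0 : (keys.foldl (fun d k => d.insert k (-1 : Int)) PySem.Dict.empty).items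
      = keys.map (fun k => (k, -(1 + (min (pvM keys k) 0 : Int)))) := by
    have := PySem.Dict.items_foldl_insert_fresh keys (fun k => k) (fun _ => (-1 : Int))
      PySem.Dict.empty (by intro a _; simp) (by simpa using hpre)
    simpa using this
  exact loop_final keys hpre _ 0 _ keys h0 hpre
    (by intro k; simp) (by unfold pvMaxLen; omega)
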